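-- pv_equiv track=rewrite | github.com/thaingoctam/Area-Foster-APP | PREMO/save_pro_key_2 - Copy - Copy/Module/SaveAndReadFile.py | copyListAndRemoveObject
-- ===== SOURCE A (Python) =====
-- def copyListAndRemoveObject(list):
--     ListCopy = []
--     for item in list:
--         listTG = []
--         for i in range(len(item)):
--             if i == 0 or i == 13:
--                 pass
--             else:
--                 listTG.append(item[i])
--         ListCopy.append(listTG)
--     return ListCopy
-- ===== SOURCE B (Python) =====
-- def copyListAndRemoveObject(list):
--     return [item[1:13] + item[14:] for item in list]
-- ===== Notes on version B (the rewrite author's own statement) =====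
-- stated objective: idiomatic
-- what changed: Replaces the per-index inner loop with its skip-branch and the explicit accumulators by a single comprehension over slice concatenation item[1:13] + item[14:], which drops indices 0 and 13 without any index counter or equality tests.
import Mathlib
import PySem

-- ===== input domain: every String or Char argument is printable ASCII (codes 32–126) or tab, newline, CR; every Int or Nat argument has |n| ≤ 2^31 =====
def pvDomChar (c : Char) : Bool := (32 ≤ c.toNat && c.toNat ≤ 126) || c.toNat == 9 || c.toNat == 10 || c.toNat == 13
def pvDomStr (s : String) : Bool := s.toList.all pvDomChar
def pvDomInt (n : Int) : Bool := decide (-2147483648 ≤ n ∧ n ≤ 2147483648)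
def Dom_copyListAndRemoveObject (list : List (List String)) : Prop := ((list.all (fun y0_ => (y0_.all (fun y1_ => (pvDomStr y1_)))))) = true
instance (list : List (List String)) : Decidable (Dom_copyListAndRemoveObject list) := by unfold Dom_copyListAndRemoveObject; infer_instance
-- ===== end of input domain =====

-- B replaces A's per-index inner loop (skip i = 0 and i = 13) by slice concatenation item[1:13] + item[14:]; idiomatic, same cost.

-- ===== PORT A =====
-- literal transliteration: outer loop appends listTG; inner loop over range(len(item)) skips i == 0 and i == 13
def copyListAndRemoveObject (list : List (List String)) : List (List String) :=
  list.foldl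
    (fun ListCopy item =>
      let listTG :=
        (PySem.List.pyRange 0 (PySem.List.len item) 1).foldl
          (fun listTG i =>
            if i = 0 ∨ i = 13 then listTG
            else listTG ++ [PySem.List.pyGetD item i ""]) []
      ListCopy ++ [listTG]) []

-- ===== PORT B =====
-- literal transliteration of Source B: [item[1:13] + item[14:] for item in list]
def copyListAndRemoveObject_alt (list : List (List String)) : List (List String) :=
  list.map (fun item => PySem.List.slice item (some 1) (some 13) ++ PySem.List.slice item (some 14) none)

-- ===== PRECONDITION & SPEC =====
def Spec_copyListAndRemoveObject (list : List (List String)) (out : List (List String)) : Prop := out = copyListAndRemoveObject_alt list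
instance (list : List (List String)) (out : List (List String)) : Decidable (Spec_copyListAndRemoveObject list out) := by unfold Spec_copyListAndRemoveObject; infer_instance

-- ===== CLAIM (what is proved, stated in full; the proofs are below) =====
def Claim_equal_copyListAndRemoveObject : Prop := ∀ (list : List (List String)), Dom_copyListAndRemoveObject list → Spec_copyListAndRemoveObject list (copyListAndRemoveObject list)

-- ===== LEMMAS AND PROOFS =====

-- the keep-test of A's inner loop as a Bool predicate
lemma pv_if_flip (item : List String) (acc : List String) (i : Int) :
    (if i = 0 ∨ i = 13 then acc else acc ++ [PySem.List.pyGetD item i ""])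
    = (if (decide (i ≠ 0 ∧ i ≠ 13)) = true then acc ++ [PySem.List.pyGetD item i ""] else acc) := by
  by_cases h : i = 0 ∨ i = 13 <;> simp [h] <;> tauto

lemma pv_filter_small {n : Int} (h0 : 0 ≤ n) (h13 : n ≤ 13) :
    (PySem.List.pyRange 0 n 1).filter (fun i => decide (i ≠ 0 ∧ i ≠ 13))
    = PySem.List.pyRange 1 n 1 := by
  by_cases hpos : 0 < n
  · have hf : List.filter (fun i => decide (i ≠ 0 ∧ i ≠ 13)) (PySem.List.pyRange (0+1) n 1)
        = PySem.List.pyRange (0+1) n 1 := by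
      apply List.filter_eq_self.mpr
      intro x hx
      have := (PySem.List.mem_pyRange_one).mp hx
      simp only [decide_eq_true_eq]
      omega
    rw [PySem.List.pyRange_one_cons hpos]
    simp only [List.filter_cons]
    simp only [decide_eq_true_eq, ne_eq, not_true_eq_false, false_and, if_false]
    rw [hf]
    norm_num
  · rw [PySem.List.pyRange_one_eq_nil (by omega), PySem.List.pyRange_one_eq_nil (by omega)]
    rfl

lemma pv_filter_big {n : Int} (h : 13 < n) :
    (PySem.List.pyRange 0 n 1).filter (fun i => decide (i ≠ 0 ∧ i ≠ 13))
    = PySem.List.pyRange 1 13 1 ++ PySem.List.pyRange 14 n 1 := by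
  rw [PySem.List.pyRange_one_append 0 1 n (by omega) (by omega),
      PySem.List.pyRange_one_append 1 13 n (by omega) (by omega),
      PySem.List.pyRange_one_append 13 14 n (by omega) (by omega)]
  have e0 : PySem.List.pyRange (0:Int) 1 1 = [0] := PySem.List.pyRange_one_singleton 0
  have e13 : PySem.List.pyRange (13:Int) 14 1 = [13] := PySem.List.pyRange_one_singleton 13
  rw [e0, e13]
  simp only [List.filter_append]
  have f1 : List.filter (fun i => decide (i ≠ 0 ∧ i ≠ 13)) ([0] : List Int) = [] := by decide
  have f2 : List.filter (fun i => decide (i ≠ 0 ∧ i ≠ 13)) ([13] : List Int) = [] := by decide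
  have g1 : List.filter (fun i => decide (i ≠ 0 ∧ i ≠ 13)) (PySem.List.pyRange 1 13 1)
      = PySem.List.pyRange 1 13 1 := by
    apply List.filter_eq_self.mpr
    intro x hx; have := (PySem.List.mem_pyRange_one).mp hx
    simp only [decide_eq_true_eq]; omega
  have g2 : List.filter (fun i => decide (i ≠ 0 ∧ i ≠ 13)) (PySem.List.pyRange 14 n 1)
      = PySem.List.pyRange 14 n 1 := by
    apply List.filter_eq_self.mpr
    intro x hx; have := (PySem.List.mem_pyRange_one).mp hx
    simp only [decide_eq_true_eq]; omega
  rw [f1, f2, g1, g2]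
  simp

-- A's inner loop equals the two slices of B
lemma pv_inner_eq (item : List String) :
    (PySem.List.pyRange 0 (PySem.List.len item) 1).foldl
      (fun listTG i =>
        if i = 0 ∨ i = 13 then listTG
        else listTG ++ [PySem.List.pyGetD item i ""]) []
    = PySem.List.slice item (some 1) (some 13) ++ PySem.List.slice item (some 14) none := by
  rw [PySem.List.foldl_congr_mem _ _
        (fun acc i => if (decide (i ≠ 0 ∧ i ≠ 13)) = true then acc ++ [PySem.List.pyGetD item i ""] else acc)
        _ (fun acc x _ => pv_if_flip item acc x)]
  rw [PySem.List.foldl_append_if (fun i => decide (i ≠ 0 ∧ i ≠ 13)) (fun i => PySem.List.pyGetD item i "")]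
  simp only [List.nil_append]
  have hlen : PySem.List.len item = (item.length : Int) := by simp [PySem.List.len]
  have hs13 : PySem.List.slice item (some 1) (some 13) = (item.drop 1).take 12 :=
    PySem.List.slice_natCast item 1 13
  have hs14 : PySem.List.slice item (some 14) none = item.drop 14 :=
    PySem.List.slice_from_natCast item 14
  rw [hs13, hs14]
  by_cases hbig : 13 < (item.length : Int)
  · rw [hlen, pv_filter_big hbig, List.map_append]
    have hsplit : PySem.List.pyRange 1 (PySem.List.len item) 1
        = PySem.List.pyRange 1 13 1 ++ PySem.List.pyRange 13 (PySem.List.len item) 1 :=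
      PySem.List.pyRange_one_append 1 13 _ (by omega) (by rw [hlen]; omega)
    have hdrop1 : (PySem.List.pyRange 1 (PySem.List.len item) 1).map
        (fun j => PySem.List.pyGetD item j "") = item.drop 1 :=
      PySem.List.map_pyGetD_pyRange item "" (by omega)
    have hdrop14 : (PySem.List.pyRange 14 (PySem.List.len item) 1).map
        (fun j => PySem.List.pyGetD item j "") = item.drop 14 :=
      PySem.List.map_pyGetD_pyRange item "" (by omega)
    rw [hlen] at hdrop1 hdrop14 hsplit
    rw [hsplit, List.map_append] at hdrop1
    have hl : ((PySem.List.pyRange (1:Int) 13 1).map (fun j => PySem.List.pyGetD item j "")).length = 12 := by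
      simp [PySem.List.length_pyRange_one]
    rw [← hdrop1, ← hl, List.take_left]
    rw [hdrop14]
  · -- item.length ≤ 13 : the second slice is empty and the take is vacuous
    rw [hlen, pv_filter_small (by omega) (by omega)]
    have hdrop1 : (PySem.List.pyRange 1 (PySem.List.len item) 1).map
        (fun j => PySem.List.pyGetD item j "") = item.drop 1 :=
      PySem.List.map_pyGetD_pyRange item "" (by omega)
    rw [hlen] at hdrop1
    rw [hdrop1]
    have h14 : item.drop 14 = [] := List.drop_eq_nil_of_le (by omega)
    have ht : (item.drop 1).take 12 = item.drop 1 := List.take_of_length_le (by simp; omega)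
    rw [h14, ht, List.append_nil]

-- ===== VERDICT (by name: the statement is the Claim_ definition above) =====
theorem copyListAndRemoveObject_spec : Claim_equal_copyListAndRemoveObject := by
  intro list _
  unfold Spec_copyListAndRemoveObject copyListAndRemoveObject copyListAndRemoveObject_alt
  rw [PySem.List.foldl_append_singleton_eq_map]
  simp only [List.nil_append]
  exact List.map_congr_left (fun item _ => pv_inner_eq item)
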